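-- pv_equiv track=rewrite | github.com/ge1123/english_quiz_api | services/word_service.py | _split_rows_by_area
-- ===== SOURCE A (Python) =====
-- def _split_rows_by_area(rows: list, area: list[int], group_count: int) -> list:
--     total_rows = len(rows)
--     rows_per_area = total_rows // group_count
--     chunks = [
--         rows[i * rows_per_area: (i + 1) * rows_per_area]
--         for i in range(group_count - 1)
--     ]
--     chunks.append(rows[(group_count - 1) * rows_per_area:])  # 最後一組吃掉剩下的
--
--     filtered_rows = []
--     for a in area:
--         index = a - 1
--         if 0 <= index < len(chunks):
--             filtered_rows.extend(chunks[index])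
--     return filtered_rows
-- ===== SOURCE B (Python) =====
-- def _split_rows_by_area(rows: list, area: list[int], group_count: int) -> list:
--     # Single selective pass: no precomputed chunks list; slice each requested
--     # group on demand, with the last group absorbing the remainder.
--     rows_per_area = len(rows) // group_count
--     filtered_rows = []
--     for a in area:
--         index = a - 1
--         if 0 <= index < group_count:
--             start = index * rows_per_area
--             end = len(rows) if index == group_count - 1 else (index + 1) * rows_per_area
--             filtered_rows.extend(rows[start:end])
--     return filtered_rows
-- ===== Notes on version B (the rewrite author's own statement) =====
-- stated objective: alternative
-- what changed: B drops A's two-pass build-all-chunks-then-select structure and instead, in one pass over area, bounds-checks each group index against group_count and slices only the requested groups out of rows on demand (last group extends to len(rows)), skipping the upfront slicing of every chunk.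
import Mathlib
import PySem

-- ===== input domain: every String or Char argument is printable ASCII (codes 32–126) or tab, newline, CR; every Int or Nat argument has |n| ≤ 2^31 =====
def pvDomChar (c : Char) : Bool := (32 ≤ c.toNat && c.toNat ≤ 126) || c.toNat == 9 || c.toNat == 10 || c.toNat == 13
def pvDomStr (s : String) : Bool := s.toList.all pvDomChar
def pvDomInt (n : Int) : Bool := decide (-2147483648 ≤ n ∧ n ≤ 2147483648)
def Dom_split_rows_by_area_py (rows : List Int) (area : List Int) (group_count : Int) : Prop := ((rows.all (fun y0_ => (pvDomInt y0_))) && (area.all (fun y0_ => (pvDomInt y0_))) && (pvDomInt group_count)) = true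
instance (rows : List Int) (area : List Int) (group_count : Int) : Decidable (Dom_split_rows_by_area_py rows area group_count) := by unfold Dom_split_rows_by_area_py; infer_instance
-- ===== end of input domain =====

-- B replaces A's build-all-chunks-then-select two-pass structure with a single pass over
-- area that bounds-checks against group_count and slices each requested group on demand.


-- ===== PORT A =====
def split_rows_by_area_py (rows : List Int) (area : List Int) (group_count : Int) : List Int :=
  let total_rows : Int := rows.length
  let rows_per_area : Int := PySem.Int.floordiv total_rows group_count
  let chunks : List (List Int) :=
    (PySem.List.pyRange 0 (group_count - 1) 1).map
      (fun i => PySem.List.slice rows (some (i * rows_per_area)) (some ((i + 1) * rows_per_area)))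
  let chunks := chunks ++ [PySem.List.slice rows (some ((group_count - 1) * rows_per_area)) none]
  area.foldl
    (fun filtered_rows a =>
      let index := a - 1
      if 0 ≤ index ∧ index < (chunks.length : Int) then
        filtered_rows ++ PySem.List.pyGetD chunks index []
      else filtered_rows)
    []

-- ===== PORT B =====
def split_rows_by_area_py_alt (rows : List Int) (area : List Int) (group_count : Int) : List Int :=
  let rows_per_area : Int := PySem.Int.floordiv (rows.length : Int) group_count
  area.foldl
    (fun filtered_rows a =>
      let index := a - 1
      if 0 ≤ index ∧ index < group_count then
        let start := index * rows_per_area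
        let stop : Int :=
          if index = group_count - 1 then (rows.length : Int) else (index + 1) * rows_per_area
        filtered_rows ++ PySem.List.slice rows (some start) (some stop)
      else filtered_rows)
    []

-- ===== PRECONDITION & SPEC =====
-- Pre_ excludes only group_count = 0, where A raises ZeroDivisionError (len(rows)//group_count).
def Pre_split_rows_by_area_py (rows : List Int) (area : List Int) (group_count : Int) : Prop :=
  group_count ≠ 0
instance (rows : List Int) (area : List Int) (group_count : Int) : Decidable (Pre_split_rows_by_area_py rows area group_count) := by unfold Pre_split_rows_by_area_py; infer_instance

def pvWitness_split_rows_by_area_py : List Int × List Int × Int := ([10, 20, 30, 40, 50], [1, 2], 2)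

def Spec_split_rows_by_area_py (rows : List Int) (area : List Int) (group_count : Int) (out : List Int) : Prop := out = split_rows_by_area_py_alt rows area group_count
instance (rows : List Int) (area : List Int) (group_count : Int) (out : List Int) : Decidable (Spec_split_rows_by_area_py rows area group_count out) := by unfold Spec_split_rows_by_area_py; infer_instance

-- ===== CLAIM (what is proved, stated in full; the proofs are below) =====
def Claim_equal_split_rows_by_area_py : Prop := ∀ (rows : List Int) (area : List Int) (group_count : Int), Dom_split_rows_by_area_py rows area group_count → Pre_split_rows_by_area_py rows area group_count → Spec_split_rows_by_area_py rows area group_count (split_rows_by_area_py rows area group_count)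

-- ===== LEMMAS AND PROOFS =====

-- floor division with a nonneg dividend and negative divisor: quotient ≤ 0 and
-- (g-1)*q lands at or past n (so A's single leftover chunk is empty).
theorem pv_fdiv_neg (n g : Int) (hn : 0 ≤ n) (hg : g < 0) :
    PySem.Int.floordiv n g ≤ 0 ∧ (n : Int) ≤ (g - 1) * PySem.Int.floordiv n g := by
  have h := PySem.Int.floordiv_mul_add_mod n g
  have heq := PySem.Int.mod_neg_neg (-n) (-g)
  simp only [neg_neg] at heq
  have h1 : 0 ≤ PySem.Int.mod (-n) (-g) := PySem.Int.mod_nonneg _ (by omega)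
  have h2 : PySem.Int.mod (-n) (-g) < -g := PySem.Int.mod_lt _ (by omega)
  have hm1 : g < PySem.Int.mod n g := by omega
  have hm2 : PySem.Int.mod n g ≤ 0 := by omega
  have hq : PySem.Int.floordiv n g ≤ 0 := by nlinarith [h]
  exact ⟨hq, by nlinarith [h]⟩

-- for positive group_count the quotient is nonnegative
theorem pv_fdiv_pos_nonneg (n g : Int) (hn : 0 ≤ n) (hg : 0 < g) :
    0 ≤ PySem.Int.floordiv n g := by
  rw [PySem.Int.floordiv_eq_ediv_of_pos hg]
  exact Int.ediv_nonneg hn (le_of_lt hg)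

theorem split_rows_by_area_py_spec : Claim_equal_split_rows_by_area_py := by
  intro rows area group_count _ hpre
  show split_rows_by_area_py rows area group_count = split_rows_by_area_py_alt rows area group_count
  simp only [split_rows_by_area_py, split_rows_by_area_py_alt]
  set n : Int := (rows.length : Int) with hn
  have hn0 : 0 ≤ n := by positivity
  set q : Int := PySem.Int.floordiv n group_count with hq
  set chunks : List (List Int) :=
    (PySem.List.pyRange 0 (group_count - 1) 1).map
      (fun i => PySem.List.slice rows (some (i * q)) (some ((i + 1) * q)))
    ++ [PySem.List.slice rows (some ((group_count - 1) * q)) none] with hch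
  apply PySem.List.foldl_congr_mem
  intro acc a _
  rcases lt_or_gt_of_ne hpre with hneg | hpos
  · -- group_count < 0 : both sides append nothing
    obtain ⟨hqle, hge⟩ := pv_fdiv_neg n group_count hn0 hneg
    rw [← hq] at hqle hge
    have hnil : PySem.List.slice rows (some ((group_count - 1) * q)) none = [] := by
      rw [PySem.List.slice_from rows (by nlinarith)]
      apply List.drop_eq_nil_of_le
      omega
    have hrange : PySem.List.pyRange 0 (group_count - 1) 1 = [] :=
      PySem.List.pyRange_one_eq_nil (by omega)
    have hchunks : chunks = [[]] := by rw [hch, hrange, hnil]; rfl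
    rw [hchunks, if_neg (by omega : ¬(0 ≤ a - 1 ∧ a - 1 < group_count))]
    by_cases h1 : 0 ≤ a - 1 ∧ a - 1 < ((([[]] : List (List Int)).length : Nat) : Int)
    · rw [if_pos h1]
      have ha : a - 1 = 0 := by simp at h1; omega
      rw [ha]
      simp [PySem.List.pyGetD_zero_cons]
    · rw [if_neg h1]
  · -- 0 < group_count
    have hlen : (chunks.length : Int) = group_count := by
      rw [hch]
      simp only [List.length_append, List.length_map, PySem.List.length_pyRange_one,
        List.length_cons, List.length_nil]
      push_cast
      omega
    rw [hlen]
    by_cases hcond : 0 ≤ a - 1 ∧ a - 1 < group_count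
    · rw [if_pos hcond, if_pos hcond]
      congr 1
      obtain ⟨h0, hlt⟩ := hcond
      have hq0 : 0 ≤ q := pv_fdiv_pos_nonneg n group_count hn0 hpos
      have hidx : ((a - 1).toNat : Int) = a - 1 := by omega
      have hltlen : a - 1 < (chunks.length : Int) := by omega
      rw [PySem.List.pyGetD_eq_getElem chunks [] h0 hltlen]
      by_cases hlast : a - 1 = group_count - 1
      · -- last group: A takes the open-ended slice, B slices up to len(rows)
        have hmaplen : ((PySem.List.pyRange 0 (group_count - 1) 1).map
            (fun i => PySem.List.slice rows (some (i * q)) (some ((i + 1) * q)))).length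
            = (a - 1).toNat := by
          simp only [List.length_map, PySem.List.length_pyRange_one]
          omega
        simp only [hch]
        rw [List.getElem_append_right (by omega)]
        simp only [hmaplen, Nat.sub_self, List.getElem_cons_zero]
        rw [if_pos hlast, hlast]
        have hs0 : 0 ≤ (group_count - 1) * q := mul_nonneg (by omega) hq0
        rw [PySem.List.slice_from rows hs0, PySem.List.slice_toNat rows hs0 hn0]
        refine (List.take_of_length_le ?_).symm
        simp only [List.length_drop]
        omega
      · -- interior group: both sides are rows[(a-1)*q : a*q]
        have hmem : (a - 1).toNat <
            ((PySem.List.pyRange 0 (group_count - 1) 1).map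
              (fun i => PySem.List.slice rows (some (i * q)) (some ((i + 1) * q)))).length := by
          simp only [List.length_map, PySem.List.length_pyRange_one]
          omega
        simp only [hch]
        rw [List.getElem_append_left hmem]
        simp only [List.getElem_map]
        rw [PySem.List.getElem_pyRange_one, if_neg hlast, zero_add, hidx]
    · rw [if_neg hcond, if_neg hcond]
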